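-- pv_equiv track=rewrite | github.com/bioscan-ml/bioscan-clip | scripts/create_statistics_summaries.py | get_grouped_split_frequencies
-- ===== SOURCE A (Python) =====
-- from collections import Counter
--
-- def get_grouped_split_frequencies(counts, mapping):
--     mapped_counts = {}
--     for raw_split,split_counts in counts.items():
--         split = mapping[raw_split]
--         if split not in mapped_counts:
--             mapped_counts[split] = {}
--             for level in split_counts.keys():
--                 mapped_counts[split][level] = Counter()
--         for level,c in split_counts.items():
--             mapped_counts[split][level].update(c)
--     return mapped_counts
-- ===== SOURCE B (Python) =====
-- from collections import Counter
--
-- def get_grouped_split_frequencies(counts, mapping):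
--     # Pass 1: invert the mapping — collect each raw split's per-level counts
--     # into its mapped group, preserving first-occurrence order of groups.
--     groups = {}
--     for raw_split, split_counts in counts.items():
--         groups.setdefault(mapping[raw_split], []).append(split_counts)
--     # Pass 2: aggregate each group; the level set is fixed by the group's
--     # first member (a level absent there raises KeyError, as intended).
--     result = {}
--     for split, members in groups.items():
--         agg = {level: Counter() for level in members[0]}
--         for member in members:
--             for level, c in member.items():
--                 agg[level].update(c)
--         result[split] = agg
--     return result
-- ===== Notes on version B (the rewrite author's own statement) =====
-- stated objective: alternative
-- what changed: A aggregates in a single interleaved pass that initializes and updates the nested per-split/per-level Counter dict as it scans; B first inverts the mapping into ordered groups of per-level count dicts and then aggregates each group separately (levels frozen from the group's first member), the same dict being assembled group by group.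
import Mathlib
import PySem

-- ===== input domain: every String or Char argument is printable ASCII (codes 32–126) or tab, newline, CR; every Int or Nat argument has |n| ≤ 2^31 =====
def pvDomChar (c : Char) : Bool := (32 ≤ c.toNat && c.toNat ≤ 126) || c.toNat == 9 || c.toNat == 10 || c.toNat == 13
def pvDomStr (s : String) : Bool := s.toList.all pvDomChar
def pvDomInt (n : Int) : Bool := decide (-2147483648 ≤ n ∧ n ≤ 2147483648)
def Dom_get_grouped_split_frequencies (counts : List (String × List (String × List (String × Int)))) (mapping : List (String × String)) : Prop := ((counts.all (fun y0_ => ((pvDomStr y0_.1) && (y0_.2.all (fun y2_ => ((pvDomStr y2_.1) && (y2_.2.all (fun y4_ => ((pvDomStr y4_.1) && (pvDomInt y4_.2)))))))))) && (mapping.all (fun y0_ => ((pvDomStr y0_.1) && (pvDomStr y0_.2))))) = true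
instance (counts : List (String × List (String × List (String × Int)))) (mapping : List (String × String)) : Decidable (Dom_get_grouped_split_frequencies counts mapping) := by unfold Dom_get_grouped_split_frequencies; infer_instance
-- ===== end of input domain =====

-- B re-implements the aggregation in two passes (invert the mapping into groups, then
-- aggregate each group); the proof shows the interleaved one-pass A returns the same value.

-- ===== PORT A =====
-- shared primitives of both Pythons: `mapping[k]` lookup and `ctr.update(c)` (Counter.update)
def pvLookup (mapping : List (String × String)) (k : String) : Option String :=
  (PySem.Dict.mk mapping).get? k

def pvUpdateCtr (ctr : PySem.Dict String Int) (c : List (String × Int)) : PySem.Dict String Int :=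
  c.foldl (fun d q => d.modify q.1 0 (· + q.2)) ctr

-- `{level: Counter() for level in sc}` / A's init loop (an empty Counter per level)
def pvInitLevels (sc : List (String × List (String × Int))) : PySem.Dict String (PySem.Dict String Int) :=
  sc.foldl (fun d p => d.insert p.1 PySem.Dict.empty) PySem.Dict.empty

-- A's inner loop: `for level,c in split_counts.items(): mapped_counts[split][level].update(c)`
-- (none = KeyError when a level is absent)
def pvAUpdateSplit (mc : PySem.Dict String (PySem.Dict String (PySem.Dict String Int)))
    (split : String) (sc : List (String × List (String × Int))) :
    Option (PySem.Dict String (PySem.Dict String (PySem.Dict String Int))) :=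
  sc.foldl (fun acc p => acc.bind fun mc =>
      (mc.get? split).bind fun lv =>
      (lv.get? p.1).bind fun ctr =>
      some (mc.insert split (lv.insert p.1 (pvUpdateCtr ctr p.2)))) (some mc)

-- A's loop body after the split has been resolved
def pvAApply (mc : PySem.Dict String (PySem.Dict String (PySem.Dict String Int)))
    (split : String) (sc : List (String × List (String × Int))) :
    Option (PySem.Dict String (PySem.Dict String (PySem.Dict String Int))) :=
  pvAUpdateSplit (if mc.contains split then mc else mc.insert split (pvInitLevels sc)) split sc

-- one iteration of A's outer loop (none = a KeyError was raised)
def pvAStep (mapping : List (String × String))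
    (acc : Option (PySem.Dict String (PySem.Dict String (PySem.Dict String Int))))
    (e : String × List (String × List (String × Int))) :
    Option (PySem.Dict String (PySem.Dict String (PySem.Dict String Int))) :=
  acc.bind fun mc => (pvLookup mapping e.1).bind fun split => pvAApply mc split e.2

-- the nested dict rendered back to the association-list convention
def pvRender (mc : PySem.Dict String (PySem.Dict String (PySem.Dict String Int))) :
    List (String × List (String × List (String × Int))) :=
  mc.items.map (fun p => (p.1, p.2.items.map (fun q => (q.1, q.2.items))))

def get_grouped_split_frequencies (counts : List (String × List (String × List (String × Int)))) (mapping : List (String × String)) : List (String × List (String × List (String × Int))) :=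
  match counts.foldl (pvAStep mapping) (some PySem.Dict.empty) with
  | some mc => pvRender mc
  | none => []   -- unreachable under Pre_ (the Python raises KeyError there)

-- ===== PORT B =====
-- B's innermost loop: `for level, c in member.items(): agg[level].update(c)`
def pvUpdateLevels (agg : PySem.Dict String (PySem.Dict String Int))
    (member : List (String × List (String × Int))) :
    Option (PySem.Dict String (PySem.Dict String Int)) :=
  member.foldl (fun acc p => acc.bind fun a =>
      (a.get? p.1).bind fun ctr =>
      some (a.insert p.1 (pvUpdateCtr ctr p.2))) (some agg)

-- aggregate one group: levels frozen from members[0], then update with every member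
def pvAgg (members : List (List (String × List (String × Int)))) :
    Option (PySem.Dict String (PySem.Dict String Int)) :=
  (PySem.List.pyGet? members 0).bind fun m0 =>
    members.foldl (fun acc member => acc.bind fun a => pvUpdateLevels a member)
      (some (pvInitLevels m0))

-- pass 1: `groups.setdefault(mapping[raw_split], []).append(split_counts)`
def pvGroups (counts : List (String × List (String × List (String × Int)))) (mapping : List (String × String)) :
    Option (PySem.Dict String (List (List (String × List (String × Int))))) :=
  counts.foldl (fun acc p => acc.bind fun g =>
      (pvLookup mapping p.1).bind fun s =>
      some (g.modify s [] (· ++ [p.2]))) (some PySem.Dict.empty)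

-- pass 2: assemble the result dict, one aggregated group per mapped split
def pvAssemble (g : PySem.Dict String (List (List (String × List (String × Int))))) :
    Option (PySem.Dict String (PySem.Dict String (PySem.Dict String Int))) :=
  g.items.foldl (fun acc p => acc.bind fun r =>
      (pvAgg p.2).bind fun a => some (r.insert p.1 a)) (some PySem.Dict.empty)

def get_grouped_split_frequencies_alt (counts : List (String × List (String × List (String × Int)))) (mapping : List (String × String)) : List (String × List (String × List (String × Int))) :=
  match (pvGroups counts mapping).bind pvAssemble with
  | some mc => pvRender mc
  | none => []   -- unreachable under Pre_ (the Python raises KeyError there)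

-- ===== PRECONDITION & SPEC =====
-- Pre_ excludes exactly the inputs on which the Python A raises KeyError: a raw split
-- missing from `mapping`, or an entry carrying a level absent from the first entry of
-- its mapped group (the levels are frozen from that first entry).
def Pre_get_grouped_split_frequencies (counts : List (String × List (String × List (String × Int)))) (mapping : List (String × String)) : Prop :=
  ∀ p ∈ counts, (PySem.Dict.mk mapping).contains p.1 = true ∧
    ∀ q ∈ p.2,
      q.1 ∈ (((counts.find? (fun r => (PySem.Dict.mk mapping).get? r.1 == (PySem.Dict.mk mapping).get? p.1)).getD p).2.map Prod.fst)
instance (counts : List (String × List (String × List (String × Int)))) (mapping : List (String × String)) : Decidable (Pre_get_grouped_split_frequencies counts mapping) := by unfold Pre_get_grouped_split_frequencies; infer_instance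

def pvWitness_get_grouped_split_frequencies : (List (String × List (String × List (String × Int)))) × (List (String × String)) :=
  ([("a", [("x", [("u", 1)])]), ("b", [("x", [("u", 2)])])], [("a", "t"), ("b", "t")])

def Spec_get_grouped_split_frequencies (counts : List (String × List (String × List (String × Int)))) (mapping : List (String × String)) (out : List (String × List (String × List (String × Int)))) : Prop := out = get_grouped_split_frequencies_alt counts mapping
instance (counts : List (String × List (String × List (String × Int)))) (mapping : List (String × String)) (out : List (String × List (String × List (String × Int)))) : Decidable (Spec_get_grouped_split_frequencies counts mapping out) := by unfold Spec_get_grouped_split_frequencies; infer_instance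

-- ===== CLAIM (what is proved, stated in full; the proofs are below) =====
def Claim_equal_get_grouped_split_frequencies : Prop := ∀ (counts : List (String × List (String × List (String × Int)))) (mapping : List (String × String)), Dom_get_grouped_split_frequencies counts mapping → Pre_get_grouped_split_frequencies counts mapping → Spec_get_grouped_split_frequencies counts mapping (get_grouped_split_frequencies counts mapping)

-- ===== LEMMAS AND PROOFS =====

-- the step of pass 2 as a named function (proof-side only; pvAssemble's lambda is this by rfl)
def pvStep2 (acc : Option (PySem.Dict String (PySem.Dict String (PySem.Dict String Int))))
    (p : String × List (List (String × List (String × Int)))) :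
    Option (PySem.Dict String (PySem.Dict String (PySem.Dict String Int))) :=
  acc.bind fun r => (pvAgg p.2).bind fun a => some (r.insert p.1 a)

lemma pvAssemble_eq (g : PySem.Dict String (List (List (String × List (String × Int))))) :
    pvAssemble g = g.items.foldl pvStep2 (some PySem.Dict.empty) := rfl

-- none propagates through the pass-2 fold
lemma pvStep2_fold_none (l : List (String × List (List (String × List (String × Int))))) :
    l.foldl pvStep2 none = none := by
  induction l with
  | nil => rfl
  | cons e t ih => simpa [pvStep2] using ih


-- re-inserting the value a key already has does not change a dict with unique keys
lemma pv_insert_get_self {ν : Type} (d : PySem.Dict String ν) {k : String} {v : ν}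
    (h : d.get? k = some v) (hnd : d.keys.Nodup) : d.insert k v = d := by
  apply PySem.Dict.ext
  rw [PySem.Dict.items_insert_of_contains d v (by rw [PySem.Dict.contains_eq_isSome_get?, h]; rfl)]
  conv_rhs => rw [← List.map_id d.items]
  apply List.map_congr_left
  rintro ⟨p1, p2⟩ hp
  by_cases hpk : p1 = k
  · subst hpk
    have h2 := PySem.Dict.get?_of_mem_items d hp hnd
    rw [h, Option.some_inj] at h2
    simp [h2]
  · simp [hpk]

-- inserts at distinct keys commute when the first key is already present
lemma pv_insert_comm {ν : Type} (d : PySem.Dict String ν) {s k : String} (b a : ν)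
    (hne : k ≠ s) (hs : s ∈ d.keys) :
    (d.insert s b).insert k a = (d.insert k a).insert s b := by
  have hcs : d.contains s = true := (PySem.Dict.contains_iff_mem_keys d s).mpr hs
  apply PySem.Dict.ext
  by_cases hk : d.contains k = true
  · rw [PySem.Dict.items_insert_of_contains _ a
        (by rw [PySem.Dict.contains_insert]; simp [hk]),
      PySem.Dict.items_insert_of_contains _ b hcs,
      PySem.Dict.items_insert_of_contains _ b
        (by rw [PySem.Dict.contains_insert]; simp [hcs]),
      PySem.Dict.items_insert_of_contains _ a hk]
    simp only [List.map_map]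
    apply List.map_congr_left
    intro p _
    by_cases hps : p.1 = s <;> by_cases hpk : p.1 = k <;>
      simp_all [Function.comp, Ne.symm hne]
  · have hk' : d.contains k = false := by simpa using hk
    rw [PySem.Dict.items_insert_of_not_contains _ a
        (by rw [PySem.Dict.contains_insert]; simp [hk', hne]),
      PySem.Dict.items_insert_of_contains _ b hcs,
      PySem.Dict.items_insert_of_contains _ b
        (by rw [PySem.Dict.contains_insert]; simp [hcs]),
      PySem.Dict.items_insert_of_not_contains _ a hk']
    rw [List.map_append]
    simp [hne]

-- none propagates through any bind-shaped fold
lemma pv_foldl_bind_none {α β : Type} (h : β → α → Option β) (l : List α) :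
    l.foldl (fun acc p => acc.bind (fun x => h x p)) none = none := by
  induction l with
  | nil => rfl
  | cons e t ih => simpa using ih

-- A's inner loop, characterised: it rewrites only the `split` entry, by B's inner loop
lemma pvAUpdateSplit_eq (sc : List (String × List (String × Int)))
    (mc : PySem.Dict String (PySem.Dict String (PySem.Dict String Int)))
    (split : String) (lv : PySem.Dict String (PySem.Dict String Int))
    (h : mc.get? split = some lv) (hnd : mc.keys.Nodup) :
    pvAUpdateSplit mc split sc = (pvUpdateLevels lv sc).map (fun a => mc.insert split a) := by
  induction sc generalizing mc lv with
  | nil =>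
    simp [pvAUpdateSplit, pvUpdateLevels, pv_insert_get_self mc h hnd]
  | cons q rest ih =>
    cases hq : lv.get? q.1 with
    | none =>
      simp only [pvAUpdateSplit, pvUpdateLevels, List.foldl_cons, Option.bind_some, h, hq,
        Option.bind_none]
      rw [pv_foldl_bind_none, pv_foldl_bind_none]
      rfl
    | some ctr =>
      have hins : (mc.insert split (lv.insert q.1 (pvUpdateCtr ctr q.2))).get? split
          = some (lv.insert q.1 (pvUpdateCtr ctr q.2)) := PySem.Dict.get?_insert_self mc split _
      have hnd2 := PySem.Dict.nodup_keys_insert mc split (lv.insert q.1 (pvUpdateCtr ctr q.2)) hnd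
      have hrec := ih (mc.insert split (lv.insert q.1 (pvUpdateCtr ctr q.2)))
        (lv.insert q.1 (pvUpdateCtr ctr q.2)) hins hnd2
      simp only [pvAUpdateSplit, pvUpdateLevels, List.foldl_cons, Option.bind_some, h, hq] at hrec ⊢
      rw [hrec]
      cases hres : (pvUpdateLevels (lv.insert q.1 (pvUpdateCtr ctr q.2)) rest) <;>
        simp only [pvUpdateLevels] at hres <;>
        simp [PySem.Dict.insert_insert_self]

lemma pvAApply_of_get (mc : PySem.Dict String (PySem.Dict String (PySem.Dict String Int)))
    (split : String) (sc : List (String × List (String × Int)))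
    (lv : PySem.Dict String (PySem.Dict String Int))
    (h : mc.get? split = some lv) (hnd : mc.keys.Nodup) :
    pvAApply mc split sc = (pvUpdateLevels lv sc).map (fun a => mc.insert split a) := by
  have hc : mc.contains split = true := by rw [PySem.Dict.contains_eq_isSome_get?, h]; rfl
  rw [pvAApply, if_pos hc]
  exact pvAUpdateSplit_eq sc mc split lv h hnd

lemma pvAApply_of_not_contains (mc : PySem.Dict String (PySem.Dict String (PySem.Dict String Int)))
    (split : String) (sc : List (String × List (String × Int)))
    (h : mc.contains split = false) (hnd : mc.keys.Nodup) :
    pvAApply mc split sc = (pvUpdateLevels (pvInitLevels sc) sc).map (fun a => mc.insert split a) := by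
  rw [pvAApply, if_neg (by simp [h])]
  rw [pvAUpdateSplit_eq sc _ split (pvInitLevels sc) (PySem.Dict.get?_insert_self mc split _)
    (PySem.Dict.nodup_keys_insert mc split _ hnd)]
  cases hres : pvUpdateLevels (pvInitLevels sc) sc <;>
    simp [PySem.Dict.insert_insert_self]

-- aggregating one more member = aggregating, then updating with it
lemma pvAgg_append (members : List (List (String × List (String × Int))))
    (sc : List (String × List (String × Int))) (h : members ≠ []) :
    pvAgg (members ++ [sc]) = (pvAgg members).bind fun a => pvUpdateLevels a sc := by
  cases members with
  | nil => exact absurd rfl h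
  | cons m0 t =>
    simp only [pvAgg, PySem.List.pyGet?_zero_cons, List.cons_append, Option.bind_some]
    simp [List.foldl_append]

lemma pvAgg_singleton (sc : List (String × List (String × Int))) :
    pvAgg [sc] = pvUpdateLevels (pvInitLevels sc) sc := by
  simp [pvAgg]

-- pass-2 fold: lookups at keys not in the remaining items are preserved
lemma pvStep2_get_preserved (l : List (String × List (List (String × List (String × Int)))))
    (s : String) :
    ∀ (r r' : PySem.Dict String (PySem.Dict String (PySem.Dict String Int))),
      s ∉ l.map Prod.fst → l.foldl pvStep2 (some r) = some r' → r'.get? s = r.get? s := by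
  induction l with
  | nil => intro r r' _ h; cases h; rfl
  | cons e t ih =>
    intro r r' hs h
    simp only [List.map_cons, List.mem_cons, not_or] at hs
    rw [List.foldl_cons] at h
    cases hA : pvAgg e.2 with
    | none =>
      simp only [pvStep2, Option.bind_some, hA, Option.bind_none] at h
      rw [pvStep2_fold_none] at h; cases h
    | some a =>
      simp only [pvStep2, Option.bind_some, hA] at h
      rw [ih (r.insert e.1 a) r' (by simpa using hs.2) h,
        PySem.Dict.get?_insert_of_ne _ _ hs.1]

-- pass-2 fold: key uniqueness is preserved
lemma pvStep2_nodup (l : List (String × List (List (String × List (String × Int))))) :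
    ∀ (r r' : PySem.Dict String (PySem.Dict String (PySem.Dict String Int))),
      l.foldl pvStep2 (some r) = some r' → r.keys.Nodup → r'.keys.Nodup := by
  induction l with
  | nil => intro r r' h hnd; cases h; exact hnd
  | cons e t ih =>
    intro r r' h hnd
    rw [List.foldl_cons] at h
    cases hA : pvAgg e.2 with
    | none =>
      simp only [pvStep2, Option.bind_some, hA, Option.bind_none] at h
      rw [pvStep2_fold_none] at h; cases h
    | some a =>
      simp only [pvStep2, Option.bind_some, hA] at h
      exact ih _ _ h (PySem.Dict.nodup_keys_insert _ _ _ hnd)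

-- pass-2 fold: the produced key set
lemma pvStep2_keys (l : List (String × List (List (String × List (String × Int))))) :
    ∀ (r r' : PySem.Dict String (PySem.Dict String (PySem.Dict String Int))),
      l.foldl pvStep2 (some r) = some r' → ∀ s, s ∈ r'.keys ↔ s ∈ r.keys ∨ s ∈ l.map Prod.fst := by
  induction l with
  | nil => intro r r' h s; cases h; simp
  | cons e t ih =>
    intro r r' h s
    rw [List.foldl_cons] at h
    cases hA : pvAgg e.2 with
    | none =>
      simp only [pvStep2, Option.bind_some, hA, Option.bind_none] at h
      rw [pvStep2_fold_none] at h; cases h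
    | some a =>
      simp only [pvStep2, Option.bind_some, hA] at h
      rw [ih _ _ h s, PySem.Dict.mem_keys_insert]
      simp only [List.map_cons, List.mem_cons]
      tauto

-- an insert at a key not touched by the remaining items commutes with the pass-2 fold
lemma pvStep2_comm (l : List (String × List (List (String × List (String × Int)))))
    (s : String) (b : PySem.Dict String (PySem.Dict String Int)) :
    ∀ (r : PySem.Dict String (PySem.Dict String (PySem.Dict String Int))),
      s ∉ l.map Prod.fst → s ∈ r.keys →
      l.foldl pvStep2 (some (r.insert s b)) = (l.foldl pvStep2 (some r)).map (fun r' => r'.insert s b) := by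
  induction l with
  | nil => intro r _ _; rfl
  | cons e t ih =>
    intro r hs hmem
    simp only [List.map_cons, List.mem_cons, not_or] at hs
    rw [List.foldl_cons, List.foldl_cons]
    cases hA : pvAgg e.2 with
    | none =>
      simp only [pvStep2, Option.bind_some, hA, Option.bind_none]
      rw [pvStep2_fold_none t]
      rfl
    | some a =>
      simp only [pvStep2, Option.bind_some, hA]
      rw [pv_insert_comm r b a (Ne.symm hs.1) hmem]
      exact ih (r.insert e.1 a) (by simpa using hs.2)
        ((PySem.Dict.mem_keys_insert _ _ _ _).mpr (Or.inr hmem))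

-- the heart: extending the `s` group by one member = running A's step after pass 2
lemma pvStep2_extend (sc : List (String × List (String × Int))) (s : String) :
    ∀ (l : List (String × List (List (String × List (String × Int)))))
      (r0 : PySem.Dict String (PySem.Dict String (PySem.Dict String Int))),
      (l.map Prod.fst).Nodup → s ∈ l.map Prod.fst → (∀ q ∈ l, q.2 ≠ []) →
      s ∉ r0.keys → r0.keys.Nodup →
      (l.map (fun q => if q.1 = s then (s, q.2 ++ [sc]) else q)).foldl pvStep2 (some r0)
        = (l.foldl pvStep2 (some r0)).bind (fun r => pvAApply r s sc) := by
  intro l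
  induction l with
  | nil => intro r0 _ hs; simp at hs
  | cons e t ih =>
    intro r0 hnd hs hvals hr0 hr0nd
    obtain ⟨hk_notin, hnd_t⟩ : e.1 ∉ t.map Prod.fst ∧ (t.map Prod.fst).Nodup := by
      simpa using hnd
    by_cases hk : e.1 = s
    · have htail : s ∉ t.map Prod.fst := hk ▸ hk_notin
      have hmap_t : t.map (fun q => if q.1 = s then (s, q.2 ++ [sc]) else q) = t := by
        have hcg : ∀ q ∈ t, (if q.1 = s then (s, q.2 ++ [sc]) else q) = id q := by
          intro q hq
          rw [if_neg]
          · rfl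
          · intro hq1; exact htail (hq1 ▸ List.mem_map_of_mem hq)
        rw [List.map_congr_left hcg, List.map_id]
      have hms : e.2 ≠ [] := hvals e List.mem_cons_self
      rw [List.map_cons, if_pos hk, List.foldl_cons, List.foldl_cons, hmap_t]
      simp only [pvStep2, Option.bind_some]
      rw [show e.1 = s from hk, pvAgg_append e.2 sc hms]
      cases hA : pvAgg e.2 with
      | none =>
        simp only [Option.bind_none]
        rw [pvStep2_fold_none t]
        rfl
      | some a =>
        cases hB : pvUpdateLevels a sc with
        | none =>
          simp only [hB, Option.bind_some, Option.bind_none]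
          rw [pvStep2_fold_none t]
          cases hT : t.foldl pvStep2 (some (r0.insert s a)) with
          | none => rfl
          | some r' =>
            have hget : r'.get? s = some a := by
              rw [pvStep2_get_preserved t s _ _ htail hT, PySem.Dict.get?_insert_self]
            have hnd' : r'.keys.Nodup :=
              pvStep2_nodup t _ _ hT (PySem.Dict.nodup_keys_insert _ _ _ hr0nd)
            simp [pvAApply_of_get r' s sc a hget hnd', hB]
        | some bb =>
          simp only [hB, Option.bind_some]
          rw [show r0.insert s bb = (r0.insert s a).insert s bb from
              (PySem.Dict.insert_insert_self r0 s a bb).symm,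
            pvStep2_comm t s bb (r0.insert s a) htail
              ((PySem.Dict.mem_keys_insert _ _ _ _).mpr (Or.inl rfl))]
          cases hT : t.foldl pvStep2 (some (r0.insert s a)) with
          | none => rfl
          | some r' =>
            have hget : r'.get? s = some a := by
              rw [pvStep2_get_preserved t s _ _ htail hT, PySem.Dict.get?_insert_self]
            have hnd' : r'.keys.Nodup :=
              pvStep2_nodup t _ _ hT (PySem.Dict.nodup_keys_insert _ _ _ hr0nd)
            simp [pvAApply_of_get r' s sc a hget hnd', hB]
    · have hs_t : s ∈ t.map Prod.fst := by
        rcases (by simpa using hs : s = e.1 ∨ s ∈ t.map Prod.fst) with h | h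
        · exact absurd h.symm hk
        · exact h
      rw [List.map_cons, if_neg hk, List.foldl_cons, List.foldl_cons]
      simp only [pvStep2, Option.bind_some]
      cases hA : pvAgg e.2 with
      | none =>
        simp only [Option.bind_none]
        rw [pvStep2_fold_none, pvStep2_fold_none t]
        rfl
      | some a =>
        simp only [Option.bind_some]
        exact ih (r0.insert e.1 a) hnd_t hs_t (fun q hq => hvals q (List.mem_cons_of_mem e hq))
          (fun hmem => by
            rcases (PySem.Dict.mem_keys_insert _ _ _ _).mp hmem with h | h
            · exact hk (h.symm)
            · exact hr0 h)
          (PySem.Dict.nodup_keys_insert _ _ _ hr0nd)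

-- pass 1 as a named step function (pvGroups' lambda is this by rfl)
def pvStep1 (mapping : List (String × String))
    (acc : Option (PySem.Dict String (List (List (String × List (String × Int))))))
    (p : String × List (String × List (String × Int))) :
    Option (PySem.Dict String (List (List (String × List (String × Int))))) :=
  acc.bind fun g => (pvLookup mapping p.1).bind fun s => some (g.modify s [] (· ++ [p.2]))

lemma pvGroups_eq (counts : List (String × List (String × List (String × Int)))) (mapping : List (String × String)) :
    pvGroups counts mapping = counts.foldl (pvStep1 mapping) (some PySem.Dict.empty) := rfl

lemma pvStep1_fold_none (mapping : List (String × String)) (l : List (String × List (String × List (String × Int)))) :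
    l.foldl (pvStep1 mapping) none = none := by
  induction l with
  | nil => rfl
  | cons e t ih => simpa [pvStep1] using ih

lemma pvGroups_inv_aux (mapping : List (String × String)) :
    ∀ (l : List (String × List (String × List (String × Int))))
      (g0 g : PySem.Dict String (List (List (String × List (String × Int))))),
      l.foldl (pvStep1 mapping) (some g0) = some g →
      g0.keys.Nodup → (∀ q ∈ g0.items, q.2 ≠ []) →
      g.keys.Nodup ∧ ∀ q ∈ g.items, q.2 ≠ [] := by
  intro l
  induction l with
  | nil => intro g0 g h h1 h2; cases h; exact ⟨h1, h2⟩
  | cons p t ih =>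
    intro g0 g h h1 h2
    rw [List.foldl_cons] at h
    cases hl : pvLookup mapping p.1 with
    | none =>
      simp only [pvStep1, Option.bind_some, hl, Option.bind_none] at h
      rw [pvStep1_fold_none] at h; cases h
    | some s =>
      simp only [pvStep1, Option.bind_some, hl] at h
      have hmod : g0.modify s [] (· ++ [p.2]) = g0.insert s (g0.getD s [] ++ [p.2]) := rfl
      apply ih _ _ h
      · rw [hmod]; exact PySem.Dict.nodup_keys_insert _ _ _ h1
      · intro q hq
        rw [hmod] at hq
        by_cases hc : g0.contains s = true
        · rw [PySem.Dict.items_insert_of_contains _ _ hc] at hq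
          obtain ⟨q', hq', hfq⟩ := List.mem_map.mp hq
          by_cases hqs : (q'.1 == s) = true
          · rw [if_pos hqs] at hfq; rw [← hfq]; simp
          · rw [if_neg hqs] at hfq; exact hfq ▸ h2 q' hq'
        · rw [PySem.Dict.items_insert_of_not_contains _ _ (by simpa using hc)] at hq
          rcases List.mem_append.mp hq with hmem | hmem
          · exact h2 q hmem
          · simp only [List.mem_singleton] at hmem; rw [hmem]; simp

-- pass-1 invariants: unique keys, every group nonempty
lemma pvGroups_inv (counts : List (String × List (String × List (String × Int)))) (mapping : List (String × String))
    (g : PySem.Dict String (List (List (String × List (String × Int)))))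
    (h : pvGroups counts mapping = some g) :
    g.keys.Nodup ∧ ∀ q ∈ g.items, q.2 ≠ [] := by
  rw [pvGroups_eq] at h
  exact pvGroups_inv_aux mapping counts PySem.Dict.empty g h
    PySem.Dict.nodup_keys_empty (by intro q hq; cases hq)

-- the main correspondence: A's one-pass fold = B's group-then-assemble
lemma pvMain (counts : List (String × List (String × List (String × Int)))) (mapping : List (String × String)) :
    counts.foldl (pvAStep mapping) (some PySem.Dict.empty) = (pvGroups counts mapping).bind pvAssemble := by
  induction counts using List.reverseRecOn with
  | nil => rfl
  | append_singleton c p ih =>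
    rw [List.foldl_append, List.foldl_cons, List.foldl_nil, pvGroups_eq, List.foldl_append,
      List.foldl_cons, List.foldl_nil, ← pvGroups_eq, ih]
    cases hg : pvGroups c mapping with
    | none => rfl
    | some g =>
      cases hl : pvLookup mapping p.1 with
      | none =>
        simp only [pvAStep, pvStep1, Option.bind_some, hl, Option.bind_none]
        cases pvAssemble g <;> rfl
      | some s =>
        simp only [pvAStep, pvStep1, Option.bind_some, hl]
        obtain ⟨hnd, hvals⟩ := pvGroups_inv c mapping g hg
        have hkeys_items : g.keys = g.items.map Prod.fst := rfl
        by_cases hc : g.contains s = true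
        · have hmod : (g.modify s [] (· ++ [p.2])).items
              = g.items.map (fun q => if q.1 = s then (s, q.2 ++ [p.2]) else q) := by
            rw [show g.modify s [] (· ++ [p.2]) = g.insert s (g.getD s [] ++ [p.2]) from rfl,
              PySem.Dict.items_insert_of_contains _ _ hc]
            apply List.map_congr_left
            rintro ⟨q1, q2⟩ hq
            by_cases hq1 : q1 = s
            · subst hq1
              rw [PySem.Dict.getD_of_mem_items g hq hnd]
              simp
            · simp [hq1]
          rw [pvAssemble_eq, pvAssemble_eq, hmod]
          exact (pvStep2_extend p.2 s g.items PySem.Dict.empty (hkeys_items ▸ hnd)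
            (hkeys_items ▸ (PySem.Dict.contains_iff_mem_keys g s).mp hc) hvals
            (by simp) PySem.Dict.nodup_keys_empty).symm
        · have hc' : g.contains s = false := by simpa using hc
          have hmod : (g.modify s [] (· ++ [p.2])).items = g.items ++ [(s, [p.2])] := by
            rw [show g.modify s [] (· ++ [p.2]) = g.insert s (g.getD s [] ++ [p.2]) from rfl,
              PySem.Dict.items_insert_of_not_contains _ _ hc',
              PySem.Dict.getD_of_not_contains _ _ hc']
            simp
          rw [pvAssemble_eq, pvAssemble_eq, hmod, List.foldl_append, List.foldl_cons,
            List.foldl_nil]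
          cases hA : g.items.foldl pvStep2 (some PySem.Dict.empty) with
          | none => rfl
          | some r =>
            have hrs : s ∉ r.keys := by
              intro hmem
              rcases (pvStep2_keys g.items _ _ hA s).mp hmem with hmem' | hmem'
              · simp at hmem'
              · exact absurd ((PySem.Dict.contains_iff_mem_keys g s).mpr
                  (hkeys_items ▸ hmem')) (by simp [hc'])
            have hrc : r.contains s = false := by
              rcases Bool.eq_false_or_eq_true (r.contains s) with hb | hb
              · exact absurd ((PySem.Dict.contains_iff_mem_keys r s).mp hb) hrs
              · exact hb
            have hrnd : r.keys.Nodup := pvStep2_nodup _ _ _ hA PySem.Dict.nodup_keys_empty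
            simp only [Option.bind_some, pvStep2]
            rw [pvAApply_of_not_contains r s p.2 hrc hrnd, pvAgg_singleton]
            cases pvUpdateLevels (pvInitLevels p.2) p.2 <;> rfl

-- ===== VERDICT (by name: the statement is the Claim_ definition above) =====
theorem get_grouped_split_frequencies_spec : Claim_equal_get_grouped_split_frequencies := by
  intro counts mapping _ _
  unfold Spec_get_grouped_split_frequencies get_grouped_split_frequencies get_grouped_split_frequencies_alt
  rw [pvMain]
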